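-- pv_equiv track=rewrite | github.com/GitNMLee/Console2048 | 2048.py | merge_down
-- ===== SOURCE A (Python) =====
-- num_of_rows = 4
--
-- num_of_cols = 4
--
-- def merge(r1,c1,r2,c2,board):
--     # Given two coordinates on the 2D board, merge them. The second coordinate is erased.
--     board[r1][c1] += board[r2][c2]
--     board[r2][c2] = 0
--     return board
--
-- def merge_down(board):
--     # Merge all cells to the bottom side of the board
--     for col in range(num_of_cols):
--         for row in range(num_of_rows-1, 0, -1):
--             if (board[row][col] != 0):
--                 # Cell is non-empty
--                 search_row = row - 1
--                         # If we found a cell of a higher number, ignore the rest of matches, this cell is blocking.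
--                 while (search_row != -1 and (board[search_row][col] == 0 or board[search_row][col] == board[row][col])):
--                     # Search for matching cells to merge
--                     if (board[search_row][col] == board[row][col]):
--                         merge(row, col, search_row, col, board)
--                         break
--                     search_row -= 1
--     # Return modified board
--     return board
-- ===== SOURCE B (Python) =====
-- num_of_rows = 4
--
-- num_of_cols = 4
--
-- def merge_down(board):
--     # Single bottom-up pass per column keeping one pending (row, value) candidate.
--     for col in range(num_of_cols):
--         pending = None  # (row, value) of nearest unpaired non-zero cell below
--         for row in range(num_of_rows - 1, -1, -1):
--             v = board[row][col]
--             if v == 0: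
--                 continue
--             if pending is not None and pending[1] == v:
--                 board[pending[0]][col] = 2 * v
--                 board[row][col] = 0
--                 pending = None
--             else:
--                 pending = (row, v)
--     return board
-- ===== Notes on version B (the rewrite author's own statement) =====
-- stated objective: simpler
-- what changed: Replaces A's per-cell upward while-search (a nested scan restarted at every non-empty cell) by a single bottom-up pass per column that maintains one pending (row,value) candidate, merging when the next non-zero cell matches it.
import Mathlib
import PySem

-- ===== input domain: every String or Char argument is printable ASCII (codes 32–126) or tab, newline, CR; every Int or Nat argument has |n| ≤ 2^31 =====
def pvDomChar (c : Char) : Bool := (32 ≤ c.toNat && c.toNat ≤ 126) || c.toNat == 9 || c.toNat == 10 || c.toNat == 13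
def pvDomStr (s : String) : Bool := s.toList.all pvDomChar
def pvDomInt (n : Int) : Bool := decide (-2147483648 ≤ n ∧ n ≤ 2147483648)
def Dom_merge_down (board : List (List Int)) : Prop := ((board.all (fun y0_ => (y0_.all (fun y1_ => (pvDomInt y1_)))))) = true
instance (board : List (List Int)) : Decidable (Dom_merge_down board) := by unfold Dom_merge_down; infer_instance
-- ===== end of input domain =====

-- B replaces A's restarted upward while-search per non-empty cell by one bottom-up pass per
-- column with a single pending candidate (objective: simpler).  Both Pythons mutate `board`
-- in place and return the same object; the equivalence proved here is about the return value.

-- ===== PORT A =====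
-- board[r][c] read/write.  Exact on Pre_ inputs (all indices accessed there are in range;
-- out-of-range accesses raise IndexError in Python and are excluded by Pre_merge_down).
def bget (b : List (List Int)) (r c : Nat) : Int := (b.getD r []).getD c 0
def bset (b : List (List Int)) (r c : Nat) (v : Int) : List (List Int) :=
  b.set r ((b.getD r []).set c v)

-- merge(r1,c1,r2,c2,board): board[r1][c1] += board[r2][c2]; board[r2][c2] = 0
def mergeP (r1 c1 r2 c2 : Nat) (b : List (List Int)) : List (List Int) :=
  bset (bset b r1 c1 (bget b r1 c1 + bget b r2 c2)) r2 c2 0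

-- A's while-loop: sr = search_row + 1 (a Nat), so `search_row != -1` is `sr ≠ 0`.
def searchA (b : List (List Int)) (col row : Nat) : Nat → List (List Int)
  | 0 => b
  | s + 1 =>
    if bget b s col = 0 ∨ bget b s col = bget b row col then
      if bget b s col = bget b row col then mergeP row col s col b
      else searchA b col row s
    else b

-- inner loop: for row in range(num_of_rows-1, 0, -1) = [3, 2, 1]  (indices are nonnegative literals)
def colA (b : List (List Int)) (col : Nat) : List (List Int) :=
  ([3, 2, 1] : List Nat).foldl
    (fun b row => if bget b row col ≠ 0 then searchA b col row row else b) b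

-- for col in range(num_of_cols) = [0, 1, 2, 3]
def merge_down (board : List (List Int)) : List (List Int) :=
  ([0, 1, 2, 3] : List Nat).foldl colA board

-- ===== PORT B =====
-- one row step of B: state = (board, pending)
def stepB (col : Nat) (st : List (List Int) × Option (Nat × Int)) (row : Nat) :
    List (List Int) × Option (Nat × Int) :=
  let v := bget st.1 row col
  if v = 0 then st
  else
    match st.2 with
    | some (pr, pv) =>
      if pv = v then (bset (bset st.1 pr col (2 * v)) row col 0, none)
      else (st.1, some (row, v))
    | none => (st.1, some (row, v))

-- for row in range(num_of_rows-1, -1, -1) = [3, 2, 1, 0]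
def colB (b : List (List Int)) (col : Nat) : List (List Int) :=
  (([3, 2, 1, 0] : List Nat).foldl (stepB col) (b, none)).1

def merge_down_alt (board : List (List Int)) : List (List Int) :=
  ([0, 1, 2, 3] : List Nat).foldl colB board

-- ===== PRECONDITION & SPEC =====
-- Pre_ = the boards whose first 4 rows exist and have ≥ 4 cells: there A returns.  It also
-- excludes a sliver where A happens to return (row 0 shorter than 4 but never reached because
-- the cells below it are 0): there B raises IndexError, as A would on any non-zero cell below.
def Pre_merge_down (board : List (List Int)) : Prop :=
  4 ≤ board.length ∧ ∀ r < 4, 4 ≤ (board.getD r []).length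
instance (board : List (List Int)) : Decidable (Pre_merge_down board) := by
  unfold Pre_merge_down; infer_instance
def pvWitness_merge_down : List (List Int) :=
  [[2, 0, 0, 4], [2, 2, 0, 0], [0, 2, 4, 0], [4, 2, 4, 2]]
def Spec_merge_down (board : List (List Int)) (out : List (List Int)) : Prop := out = merge_down_alt board
instance (board : List (List Int)) (out : List (List Int)) : Decidable (Spec_merge_down board out) := by unfold Spec_merge_down; infer_instance

-- ===== CLAIM (what is proved, stated in full; the proofs are below) =====
def Claim_equal_merge_down : Prop := ∀ (board : List (List Int)), Dom_merge_down board → Pre_merge_down board → Spec_merge_down board (merge_down board)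

-- ===== LEMMAS AND PROOFS =====

lemma len_bset (b : List (List Int)) (r c : Nat) (v : Int) :
    (bset b r c v).length = b.length := by simp [bset]

lemma getD_bset_ne (b : List (List Int)) (r c : Nat) (v : Int) (r' : Nat) (h : r' ≠ r) :
    (bset b r c v).getD r' [] = b.getD r' [] := by
  simp [bset, List.getD, List.getElem?_set_ne (Ne.symm h)]

lemma getD_bset_self (b : List (List Int)) (r c : Nat) (v : Int) (hr : r < b.length) :
    (bset b r c v).getD r [] = (b.getD r []).set c v := by
  simp [bset, List.getD, hr]

lemma bset_of_le (b : List (List Int)) (r c : Nat) (v : Int) (h : b.length ≤ r) :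
    bset b r c v = b := by
  simp [bset, List.set_eq_of_length_le h]

lemma rowlen_bset (b : List (List Int)) (r c : Nat) (v : Int) (r' : Nat) :
    ((bset b r c v).getD r' []).length = (b.getD r' []).length := by
  by_cases hr : r < b.length
  · by_cases h : r' = r
    · subst h; rw [getD_bset_self _ _ _ _ hr, List.length_set]
    · rw [getD_bset_ne _ _ _ _ _ h]
  · rw [bset_of_le _ _ _ _ (by omega)]

lemma bget_bset_ne_row (b : List (List Int)) (r c : Nat) (v : Int) (r' c' : Nat) (h : r' ≠ r) :
    bget (bset b r c v) r' c' = bget b r' c' := by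
  unfold bget; rw [getD_bset_ne _ _ _ _ _ h]

lemma bget_bset (b : List (List Int)) (r c : Nat) (v : Int) (r' c' : Nat) :
    bget (bset b r c v) r' c' =
      if r' = r ∧ c' = c ∧ r < b.length ∧ c < (b.getD r []).length then v
      else bget b r' c' := by
  by_cases h : r' = r
  · subst h
    by_cases hr : r' < b.length
    · unfold bget
      rw [getD_bset_self _ _ _ _ hr]
      by_cases hcc : c' = c
      · subst hcc
        rcases Nat.lt_or_ge c' (b.getD r' []).length with hc | hc
        · rw [if_pos ⟨rfl, rfl, hr, hc⟩]
          simp only [List.getD] at hc ⊢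
          simp [hc]
        · rw [if_neg (fun q => by omega)]
          rw [List.set_eq_of_length_le (by omega)]
      · rw [if_neg (fun q => hcc q.2.1)]
        simp [bget, List.getD, List.getElem?_set_ne (show c ≠ c' from fun e => hcc e.symm)]
    · rw [bset_of_le _ _ _ _ (by omega), if_neg (fun q => hr q.2.2.1)]
  · rw [bget_bset_ne_row _ _ _ _ _ _ h, if_neg (fun q => h q.1)]

lemma getElem_bset_len (b : List (List Int)) (r c : Nat) (v : Int) (r' : Nat)
    (h : r' < (bset b r c v).length) :
    ((bset b r c v)[r']'h).length =
      (b[r']'(by rw [len_bset] at h; exact h)).length := by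
  have h2 : r' < b.length := by rw [len_bset] at h; exact h
  have := rowlen_bset b r c v r'
  rwa [List.getD_eq_getElem _ _ h, List.getD_eq_getElem _ _ h2] at this

lemma len_searchA (b : List (List Int)) (col row sr : Nat) :
    (searchA b col row sr).length = b.length := by
  induction sr generalizing b with
  | zero => simp [searchA]
  | succ s ih =>
    simp only [searchA, mergeP]
    split_ifs <;> first | rfl | (rw [len_bset, len_bset]) | exact ih b

lemma rowlen_searchA (b : List (List Int)) (col row sr r : Nat) :
    ((searchA b col row sr).getD r []).length = ((b.getD r []).length) := by
  induction sr generalizing b with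
  | zero => simp [searchA]
  | succ s ih =>
    simp only [searchA, mergeP]
    split_ifs <;> first | rfl | (rw [rowlen_bset, rowlen_bset]) | exact ih b

lemma len_colA (b : List (List Int)) (col : Nat) : (colA b col).length = b.length := by
  simp only [colA, List.foldl]
  split_ifs <;> simp only [len_searchA]

lemma rowlen_colA (b : List (List Int)) (col r : Nat) :
    ((colA b col).getD r []).length = (b.getD r []).length := by
  simp only [colA, List.foldl]
  split_ifs <;> simp only [rowlen_searchA]

set_option maxHeartbeats 1600000 in
-- the per-column equivalence: case analysis on the original values of column c, rows 0..3
lemma colA_eq_colB (b : List (List Int)) (c : Nat) (hb : 4 ≤ b.length)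
    (g0 : c < (b.getD 0 []).length) (g1 : c < (b.getD 1 []).length)
    (g2 : c < (b.getD 2 []).length) (g3 : c < (b.getD 3 []).length) :
    colA b c = colB b c := by
  have e0 : (0:Nat) < b.length := by omega
  have e1 : (1:Nat) < b.length := by omega
  have e2 : (2:Nat) < b.length := by omega
  have e3 : (3:Nat) < b.length := by omega
  by_cases h3 : bget b 3 c = 0
  · by_cases h2 : bget b 2 c = 0
    · by_cases h1 : bget b 1 c = 0
      · simp_all [colA, colB, List.foldl, searchA, stepB, mergeP, bget_bset,
          len_bset, getElem_bset_len, rowlen_bset, two_mul, apply_ite] <;> (intros; omega)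
      · by_cases h01 : bget b 0 c = bget b 1 c
        · simp_all [colA, colB, List.foldl, searchA, stepB, mergeP, bget_bset,
            len_bset, getElem_bset_len, rowlen_bset, two_mul, apply_ite] <;> (intros; omega)
        · have h01' : ¬ bget b 1 c = bget b 0 c := fun e => h01 e.symm
          simp_all [colA, colB, List.foldl, searchA, stepB, mergeP, bget_bset,
            len_bset, getElem_bset_len, rowlen_bset, two_mul, apply_ite] <;> (intros; omega)
    · by_cases h12 : bget b 1 c = bget b 2 c
      · simp_all [colA, colB, List.foldl, searchA, stepB, mergeP, bget_bset,
          len_bset, getElem_bset_len, rowlen_bset, two_mul, apply_ite] <;> (intros; omega)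
      · have h12' : ¬ bget b 2 c = bget b 1 c := fun e => h12 e.symm
        by_cases h1 : bget b 1 c = 0
        · by_cases h02 : bget b 0 c = bget b 2 c
          · simp_all [colA, colB, List.foldl, searchA, stepB, mergeP, bget_bset,
              len_bset, getElem_bset_len, rowlen_bset, two_mul, apply_ite] <;> (intros; omega)
          · have h02' : ¬ bget b 2 c = bget b 0 c := fun e => h02 e.symm
            simp_all [colA, colB, List.foldl, searchA, stepB, mergeP, bget_bset,
              len_bset, getElem_bset_len, rowlen_bset, two_mul, apply_ite] <;> (intros; omega)
        · by_cases h01 : bget b 0 c = bget b 1 c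
          · simp_all [colA, colB, List.foldl, searchA, stepB, mergeP, bget_bset,
              len_bset, getElem_bset_len, rowlen_bset, two_mul, apply_ite] <;> (intros; omega)
          · have h01' : ¬ bget b 1 c = bget b 0 c := fun e => h01 e.symm
            simp_all [colA, colB, List.foldl, searchA, stepB, mergeP, bget_bset,
              len_bset, getElem_bset_len, rowlen_bset, two_mul, apply_ite] <;> (intros; omega)
  · by_cases h23 : bget b 2 c = bget b 3 c
    · by_cases h1 : bget b 1 c = 0
      · simp_all [colA, colB, List.foldl, searchA, stepB, mergeP, bget_bset,
          len_bset, getElem_bset_len, rowlen_bset, two_mul, apply_ite] <;> (intros; omega)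
      · by_cases h01 : bget b 0 c = bget b 1 c
        · simp_all [colA, colB, List.foldl, searchA, stepB, mergeP, bget_bset,
            len_bset, getElem_bset_len, rowlen_bset, two_mul, apply_ite] <;> (intros; omega)
        · have h01' : ¬ bget b 1 c = bget b 0 c := fun e => h01 e.symm
          simp_all [colA, colB, List.foldl, searchA, stepB, mergeP, bget_bset,
            len_bset, getElem_bset_len, rowlen_bset, two_mul, apply_ite] <;> (intros; omega)
    · have h23' : ¬ bget b 3 c = bget b 2 c := fun e => h23 e.symm
      by_cases h2 : bget b 2 c = 0
      · by_cases h13 : bget b 1 c = bget b 3 c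
        · simp_all [colA, colB, List.foldl, searchA, stepB, mergeP, bget_bset,
            len_bset, getElem_bset_len, rowlen_bset, two_mul, apply_ite] <;> (intros; omega)
        · have h13' : ¬ bget b 3 c = bget b 1 c := fun e => h13 e.symm
          by_cases h1 : bget b 1 c = 0
          · by_cases h03 : bget b 0 c = bget b 3 c
            · simp_all [colA, colB, List.foldl, searchA, stepB, mergeP, bget_bset,
                len_bset, getElem_bset_len, rowlen_bset, two_mul, apply_ite] <;> (intros; omega)
            · have h03' : ¬ bget b 3 c = bget b 0 c := fun e => h03 e.symm
              simp_all [colA, colB, List.foldl, searchA, stepB, mergeP, bget_bset,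
                len_bset, getElem_bset_len, rowlen_bset, two_mul, apply_ite] <;> (intros; omega)
          · by_cases h01 : bget b 0 c = bget b 1 c
            · simp_all [colA, colB, List.foldl, searchA, stepB, mergeP, bget_bset,
                len_bset, getElem_bset_len, rowlen_bset, two_mul, apply_ite] <;> (intros; omega)
            · have h01' : ¬ bget b 1 c = bget b 0 c := fun e => h01 e.symm
              simp_all [colA, colB, List.foldl, searchA, stepB, mergeP, bget_bset,
                len_bset, getElem_bset_len, rowlen_bset, two_mul, apply_ite] <;> (intros; omega)
      · by_cases h12 : bget b 1 c = bget b 2 c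
        · simp_all [colA, colB, List.foldl, searchA, stepB, mergeP, bget_bset,
            len_bset, getElem_bset_len, rowlen_bset, two_mul, apply_ite] <;> (intros; omega)
        · have h12' : ¬ bget b 2 c = bget b 1 c := fun e => h12 e.symm
          by_cases h1 : bget b 1 c = 0
          · by_cases h02 : bget b 0 c = bget b 2 c
            · simp_all [colA, colB, List.foldl, searchA, stepB, mergeP, bget_bset,
                len_bset, getElem_bset_len, rowlen_bset, two_mul, apply_ite] <;> (intros; omega)
            · have h02' : ¬ bget b 2 c = bget b 0 c := fun e => h02 e.symm
              simp_all [colA, colB, List.foldl, searchA, stepB, mergeP, bget_bset,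
                len_bset, getElem_bset_len, rowlen_bset, two_mul, apply_ite] <;> (intros; omega)
          · by_cases h01 : bget b 0 c = bget b 1 c
            · simp_all [colA, colB, List.foldl, searchA, stepB, mergeP, bget_bset,
                len_bset, getElem_bset_len, rowlen_bset, two_mul, apply_ite] <;> (intros; omega)
            · have h01' : ¬ bget b 1 c = bget b 0 c := fun e => h01 e.symm
              simp_all [colA, colB, List.foldl, searchA, stepB, mergeP, bget_bset,
                len_bset, getElem_bset_len, rowlen_bset, two_mul, apply_ite] <;> (intros; omega)

-- ===== VERDICT (by name: the statement is the Claim_ definition above) =====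
theorem merge_down_spec : Claim_equal_merge_down := by
  intro board _ hpre
  obtain ⟨hb, hr⟩ := hpre
  have r0 := hr 0 (by omega); have r1 := hr 1 (by omega)
  have r2 := hr 2 (by omega); have r3 := hr 3 (by omega)
  unfold Spec_merge_down
  simp only [merge_down, merge_down_alt, List.foldl]
  rw [colA_eq_colB _ 3 (by simp only [len_colA]; omega)
        (by simp only [rowlen_colA]; omega) (by simp only [rowlen_colA]; omega)
        (by simp only [rowlen_colA]; omega) (by simp only [rowlen_colA]; omega),
      colA_eq_colB _ 2 (by simp only [len_colA]; omega)
        (by simp only [rowlen_colA]; omega) (by simp only [rowlen_colA]; omega)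
        (by simp only [rowlen_colA]; omega) (by simp only [rowlen_colA]; omega),
      colA_eq_colB _ 1 (by simp only [len_colA]; omega)
        (by simp only [rowlen_colA]; omega) (by simp only [rowlen_colA]; omega)
        (by simp only [rowlen_colA]; omega) (by simp only [rowlen_colA]; omega),
      colA_eq_colB _ 0 (by omega) (by omega) (by omega) (by omega) (by omega)]
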